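-- pv_equiv track=rewrite | github.com/liamellison02/dsa-solutions | codepath/tip102/wk2/session2/standard/p4.py | prioritize_observations
-- ===== SOURCE A (Python) =====
-- def prioritize_observations(observed_species, priority_species):
-- 	pmap, priority, rem = {k:v for v,k in enumerate(priority_species)}, [], []
-- 	for s in observed_species:
-- 		if s in pmap:
-- 			priority.append((pmap[s], s))
-- 		else:
-- 			rem.append(s)
-- 	priority.sort(key=lambda x: x[0])
-- 	rem.sort()
-- 	return [s for _,s in priority] + rem
-- ===== SOURCE B (Python) =====
-- def prioritize_observations(observed_species, priority_species):
--     counts = {}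
--     for s in observed_species:
--         counts[s] = counts.get(s, 0) + 1
--     last = {}
--     for i, s in enumerate(priority_species):
--         last[s] = i
--     block = []
--     for i, s in enumerate(priority_species):
--         if last[s] == i and s in counts:
--             block += [s] * counts[s]
--     return block + sorted(x for x in observed_species if x not in last)
-- ===== Notes on version B (the rewrite author's own statement) =====
-- stated objective: alternative
-- what changed: Replaces A's tag-with-priority-index-then-stable-sort pass by a counting/bucketing pass: B tallies observed species once and emits the priority block directly by walking priority_species in order, emitting each species at its last occurrence (checked via a last-index dict) count-many times, with no sort of the priority block at all.
import Mathlib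
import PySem

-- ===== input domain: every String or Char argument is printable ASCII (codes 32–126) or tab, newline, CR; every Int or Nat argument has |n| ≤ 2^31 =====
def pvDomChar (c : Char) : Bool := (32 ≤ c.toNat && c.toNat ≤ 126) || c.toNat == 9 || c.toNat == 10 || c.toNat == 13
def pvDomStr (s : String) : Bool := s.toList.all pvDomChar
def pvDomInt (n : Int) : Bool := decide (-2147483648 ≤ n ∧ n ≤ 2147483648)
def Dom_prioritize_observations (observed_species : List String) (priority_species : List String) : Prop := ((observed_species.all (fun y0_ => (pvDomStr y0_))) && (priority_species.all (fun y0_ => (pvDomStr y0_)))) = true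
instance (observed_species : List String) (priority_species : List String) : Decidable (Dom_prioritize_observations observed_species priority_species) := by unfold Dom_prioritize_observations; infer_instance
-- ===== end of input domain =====

-- B replaces A's tag-with-last-priority-index-then-stable-sort pass by a counting pass that
-- emits the priority block directly in priority_species order (alternative algorithm, same result).


-- ===== PORT A =====
-- pmap = {k:v for v,k in enumerate(priority_species)}; the loop keeps the pair (priority, rem);
-- Python's pmap[s] is guarded by 's in pmap', so 'getD s 0' is exact there.
def prioritize_observations (observed_species : List String) (priority_species : List String) : List String :=
  let pmap : PySem.Dict String Int :=
    (PySem.List.enumerate priority_species).foldl (fun d p => d.insert p.2 p.1) PySem.Dict.empty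
  let pr : List (Int × String) × List String :=
    observed_species.foldl
      (fun acc s =>
        if pmap.contains s then (acc.1 ++ [((pmap.getD s 0), s)], acc.2)
        else (acc.1, acc.2 ++ [s]))
      ([], [])
  let priority := PySem.List.sorted pr.1 (fun x => x.1) false
  let rem := PySem.List.sorted pr.2 (fun x => x) false
  priority.map (fun p => p.2) ++ rem

-- ===== PORT B =====
-- counts = observed tallies; last = last priority index of each species; the priority block is
-- emitted directly in priority order (at each species' last occurrence), no sort of that block.
-- Python's last[s] is guarded (s always a key of last there), so 'getD s 0' is exact.
def prioritize_observations_alt (observed_species : List String) (priority_species : List String) : List String :=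
  let counts : PySem.Dict String Int :=
    observed_species.foldl (fun d s => d.insert s (d.getD s 0 + 1)) PySem.Dict.empty
  let last : PySem.Dict String Int :=
    (PySem.List.enumerate priority_species).foldl (fun d p => d.insert p.2 p.1) PySem.Dict.empty
  let block : List String :=
    (PySem.List.enumerate priority_species).foldl
      (fun acc p =>
        if last.getD p.2 0 = p.1 ∧ counts.contains p.2
        then acc ++ PySem.List.pyRepeat [p.2] (counts.getD p.2 0)
        else acc)
      []
  block ++ PySem.List.sorted (observed_species.filter (fun x => !(last.contains x))) (fun x => x) false

-- ===== PRECONDITION & SPEC =====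
def Spec_prioritize_observations (observed_species : List String) (priority_species : List String) (out : List String) : Prop := out = prioritize_observations_alt observed_species priority_species
instance (observed_species : List String) (priority_species : List String) (out : List String) : Decidable (Spec_prioritize_observations observed_species priority_species out) := by unfold Spec_prioritize_observations; infer_instance

-- ===== CLAIM (what is proved, stated in full; the proofs are below) =====
def Claim_equal_prioritize_observations : Prop := ∀ (observed_species : List String) (priority_species : List String), Dom_prioritize_observations observed_species priority_species → Spec_prioritize_observations observed_species priority_species (prioritize_observations observed_species priority_species)

-- ===== LEMMAS AND PROOFS =====

-- A's priority-index dict (the same fold as in port A)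
def pmapOf (P : List String) : PySem.Dict String Int :=
  (PySem.List.enumerate P).foldl (fun d p => d.insert p.2 p.1) PySem.Dict.empty

-- the canonical priority block, as (index, species) pairs: at each last occurrence in P,
-- the species repeated as often as it was observed
def Tlist (O P : List String) : List (Int × String) :=
  (PySem.List.enumerate P).flatMap
    (fun p => if p.2 ∈ P.drop (p.1.toNat + 1) then [] else List.replicate (O.count p.2) p)

theorem pmapOf_append (P : List String) (x : String) :
    pmapOf (P ++ [x]) = (pmapOf P).insert x (P.length : Int) := by
  unfold pmapOf
  rw [PySem.List.enumerate_append, List.foldl_append]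
  simp [PySem.List.enumerate]

-- pmap's get? is exactly "the last index of s in P"
theorem pmapOf_get?_iff (P : List String) (s : String) (i : Int) :
    (pmapOf P).get? s = some i ↔
      ∃ k : Nat, i = (k : Int) ∧ P[k]? = some s ∧ ∀ j : Nat, k < j → P[j]? ≠ some s := by
  induction P using List.reverseRecOn generalizing i with
  | nil => simp [pmapOf, PySem.List.enumerate, PySem.Dict.empty, PySem.Dict.get?]
  | append_singleton P x ih =>
    rw [pmapOf_append, PySem.Dict.get?_insert]
    by_cases hs : s = x
    · rw [if_pos hs]; subst hs
      constructor
      · intro h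
        injection h with h
        refine ⟨P.length, h.symm, by simp, fun j hj hc => ?_⟩
        obtain ⟨hlt, -⟩ := List.getElem?_eq_some_iff.mp hc
        simp at hlt; omega
      · rintro ⟨k, hk, hget, hlast⟩
        obtain ⟨hlt, -⟩ := List.getElem?_eq_some_iff.mp hget
        simp at hlt
        have hk' : k = P.length := by
          by_contra h
          exact hlast P.length (by omega) (by simp)
        subst hk'; rw [hk]
    · rw [if_neg hs, ih]
      constructor
      · rintro ⟨k, hk, hget, hlast⟩
        obtain ⟨hkP, -⟩ := List.getElem?_eq_some_iff.mp hget
        refine ⟨k, hk, by rw [List.getElem?_append_left hkP]; exact hget, fun j hj => ?_⟩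
        by_cases hjP : j < P.length
        · rw [List.getElem?_append_left hjP]; exact hlast j hj
        · by_cases hje : j = P.length
          · subst hje
            rw [List.getElem?_append_right (by omega)]
            simp
            exact fun h => hs h.symm
          · rw [List.getElem?_eq_none_iff.mpr (by simp; omega)]; simp
      · rintro ⟨k, hk, hget, hlast⟩
        obtain ⟨hlt, -⟩ := List.getElem?_eq_some_iff.mp hget
        simp at hlt
        have hkP : k < P.length := by
          rcases Nat.lt_or_ge k P.length with h | h
          · exact h
          · exfalso
            have he : k = P.length := by omega
            subst he
            rw [List.getElem?_append_right (le_refl _)] at hget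
            simp at hget
            exact hs hget.symm
        refine ⟨k, hk, by rw [List.getElem?_append_left hkP] at hget; exact hget, fun j hj hc => ?_⟩
        by_cases hjP : j < P.length
        · exact hlast j hj (by rw [List.getElem?_append_left hjP]; exact hc)
        · obtain ⟨hjl, -⟩ := List.getElem?_eq_some_iff.mp hc
          omega

theorem pmapOf_contains (P : List String) (s : String) :
    (pmapOf P).contains s = true ↔ s ∈ P := by
  unfold pmapOf
  rw [PySem.Dict.contains_iff_mem_keys,
    PySem.Dict.keys_foldl_insert_key (key := fun p : Int × String => p.2)]
  simp [PySem.List.map_snd_enumerate, PySem.Set.mem_update, PySem.Dict.keys_empty]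

-- uniqueness of a key-sorted arrangement when the key determines the element
theorem eq_of_perm_of_pairwise_le_of_key_det {α : Type} (key : α → Int)
    (l₁ l₂ : List α) (hp : l₁.Perm l₂)
    (hdet : ∀ a ∈ l₁, ∀ b ∈ l₁, key a = key b → a = b)
    (h₁ : l₁.Pairwise (fun a b => key a ≤ key b))
    (h₂ : l₂.Pairwise (fun a b => key a ≤ key b)) : l₁ = l₂ := by
  induction l₁ generalizing l₂ with
  | nil => simpa using hp.nil_eq
  | cons a t₁ ih =>
    cases l₂ with
    | nil => exact absurd hp.symm.nil_eq (by simp)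
    | cons b t₂ =>
      have hab : a = b := by
        have hbmem : b ∈ a :: t₁ := hp.symm.subset (List.mem_cons_self ..)
        have hamem : a ∈ b :: t₂ := hp.subset (List.mem_cons_self ..)
        have h1 : key a ≤ key b := by
          rcases List.mem_cons.mp hbmem with h | h
          · rw [h]
          · exact (List.pairwise_cons.mp h₁).1 b h
        have h2 : key b ≤ key a := by
          rcases List.mem_cons.mp hamem with h | h
          · rw [h]
          · exact (List.pairwise_cons.mp h₂).1 a h
        exact hdet a (List.mem_cons_self ..) b hbmem (le_antisymm h1 h2)
      subst hab
      rw [ih t₂ hp.cons_inv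
        (fun x hx y hy => hdet x (List.mem_cons_of_mem _ hx) y (List.mem_cons_of_mem _ hy))
        (List.pairwise_cons.mp h₁).2 (List.pairwise_cons.mp h₂).2]

theorem sum_map_ite_eq {α : Type} [BEq α] [LawfulBEq α] [DecidableEq α] (l : List α) (a : α) (n : Nat) :
    (l.map fun p => if p = a then n else 0).sum = n * l.count a := by
  induction l with
  | nil => simp
  | cons x t ih =>
    by_cases h : x = a
    · subst h; simp [ih, Nat.mul_add, Nat.add_comm]
    · simp [h, ih]

theorem nodup_enumerate (P : List String) (s : Int) : (PySem.List.enumerate P s).Nodup := by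
  have := PySem.List.pairwise_lt_enumerate (xs := P) (s := s)
  exact List.Pairwise.imp (fun h => by intro he; subst he; omega) this

theorem count_Tlist (O P : List String) (a : Int × String) :
    (Tlist O P).count a =
      if (pmapOf P).get? a.2 = some a.1 then O.count a.2 else 0 := by
  unfold Tlist
  rw [List.count_flatMap]
  by_cases hL : a.2 ∈ P.drop (a.1.toNat + 1)
  · rw [if_neg]
    · have : ∀ p ∈ PySem.List.enumerate P 0,
          (List.count a ∘ fun p => if p.2 ∈ P.drop (p.1.toNat + 1) then [] else List.replicate (O.count p.2) p) p = 0 := by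
        intro p hp
        simp only [Function.comp]
        by_cases hc : p.2 ∈ P.drop (p.1.toNat + 1)
        · simp [hc]
        · rw [if_neg hc, List.count_replicate]
          by_cases hpa : p = a
          · exact absurd (hpa ▸ hL) hc
          · simp [beq_eq_decide, hpa]
      rw [List.map_congr_left this]
      simp
    · intro h
      obtain ⟨k, hk, hget, hlast⟩ := (pmapOf_get?_iff P a.2 a.1).mp h
      obtain ⟨j, hj⟩ := List.mem_iff_getElem?.mp hL
      rw [List.getElem?_drop] at hj
      exact hlast (a.1.toNat + 1 + j) (by omega) (by rw [hk] at hj ⊢; simpa using hj)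
  · have hcongr : ∀ p ∈ PySem.List.enumerate P 0,
        (List.count a ∘ fun p => if p.2 ∈ P.drop (p.1.toNat + 1) then [] else List.replicate (O.count p.2) p) p
          = (fun p => if p = a then O.count a.2 else 0) p := by
      intro p hp
      simp only [Function.comp]
      by_cases hpa : p = a
      · subst hpa; rw [if_neg hL, List.count_replicate, if_pos rfl]; simp
      · by_cases hc : p.2 ∈ P.drop (p.1.toNat + 1)
        · simp [hc, hpa]
        · rw [if_neg hc, List.count_replicate, if_neg hpa]
          simp [beq_eq_decide, hpa]
    rw [List.map_congr_left hcongr, sum_map_ite_eq]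
    have hmem : a ∈ PySem.List.enumerate P 0 ↔ (pmapOf P).get? a.2 = some a.1 := by
      rw [PySem.List.mem_enumerate_iff, pmapOf_get?_iff]
      constructor
      · rintro ⟨k, hklt, rfl⟩
        refine ⟨k, by simp, by simp [List.getElem?_eq_getElem hklt], fun j hj hc => ?_⟩
        apply hL
        rw [List.mem_iff_getElem?]
        refine ⟨j - (k + 1), ?_⟩
        rw [List.getElem?_drop]
        have : (((0:Int) + k, P[k]).1.toNat + 1 + (j - (k+1))) = j := by simp; omega
        rw [this]; exact hc
      · rintro ⟨k, hk, hget, hlast⟩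
        obtain ⟨hklt, hPk⟩ := List.getElem?_eq_some_iff.mp hget
        refine ⟨k, hklt, ?_⟩
        exact Prod.ext (by rw [hk]; simp) hPk.symm
    by_cases hm : a ∈ PySem.List.enumerate P 0
    · rw [if_pos (hmem.mp hm)]
      have h1 : List.count a (PySem.List.enumerate P 0) = 1 := by
        simpa using List.count_eq_one_of_mem (nodup_enumerate P 0) hm
      rw [h1, Nat.mul_one]
    · rw [if_neg (fun h => hm (hmem.mpr h))]
      have h1 : List.count a (PySem.List.enumerate P 0) = 0 := by
        simpa using List.count_eq_zero_of_not_mem hm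
      simp [h1]

theorem count_Lp (O P : List String) (a : Int × String) :
    (((O.filter (fun s => (pmapOf P).contains s)).map
        (fun s => ((pmapOf P).getD s 0, s))).count a) =
      if (pmapOf P).get? a.2 = some a.1 then O.count a.2 else 0 := by
  rw [List.count_eq_countP, List.countP_map, List.countP_filter]
  by_cases h : (pmapOf P).get? a.2 = some a.1
  · rw [if_pos h, List.count_eq_countP]
    apply List.countP_congr
    intro s hs
    simp only [Function.comp, beq_iff_eq, Bool.and_eq_true, Prod.ext_iff]
    constructor
    · rintro ⟨⟨-, rfl⟩, -⟩; rfl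
    · rintro rfl
      refine ⟨⟨?_, rfl⟩, ?_⟩
      · rw [PySem.Dict.getD_eq_get?_getD, h]; rfl
      · rw [PySem.Dict.contains_eq_isSome_get?, h]; rfl
  · rw [if_neg h]
    rw [List.countP_eq_zero]
    intro s hs hc
    simp only [Function.comp, beq_iff_eq, Bool.and_eq_true, Prod.ext_iff] at hc
    obtain ⟨⟨hgd, rfl⟩, hcont⟩ := hc
    rw [PySem.Dict.contains_eq_isSome_get?] at hcont
    obtain ⟨v, hv⟩ := Option.isSome_iff_exists.mp hcont
    apply h
    rw [hv]
    rw [PySem.Dict.getD_eq_get?_getD, hv] at hgd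
    simpa using hgd

theorem pairwise_le_flatMap (l : List (Int × String)) (f : Int × String → List (Int × String))
    (hl : l.Pairwise (fun p q => p.1 < q.1)) (hf : ∀ p a, a ∈ f p → a.1 = p.1) :
    (l.flatMap f).Pairwise (fun a b => a.1 ≤ b.1) := by
  induction l with
  | nil => simp
  | cons p t ih =>
    rw [List.flatMap_cons, List.pairwise_append]
    refine ⟨List.pairwise_of_forall_mem_list (fun a ha b hb => ?_),
      ih (List.pairwise_cons.mp hl).2, fun a ha b hb => ?_⟩
    · rw [hf p a ha, hf p b hb]
    · obtain ⟨q, hq, hbq⟩ := List.mem_flatMap.mp hb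
      rw [hf p a ha, hf q b hbq]
      exact le_of_lt ((List.pairwise_cons.mp hl).1 q hq)

theorem pairwise_le_Tlist (O P : List String) :
    (Tlist O P).Pairwise (fun a b => a.1 ≤ b.1) := by
  apply pairwise_le_flatMap _ _ (PySem.List.pairwise_lt_enumerate P 0)
  intro p a ha
  by_cases hc : p.2 ∈ P.drop (p.1.toNat + 1)
  · rw [if_pos hc] at ha; simp at ha
  · rw [if_neg hc] at ha
    rw [List.eq_of_mem_replicate ha]

theorem pmapOf_getD_self (P : List String) (k : Nat) (hk : k < P.length) :
    ((pmapOf P).getD P[k] 0 = (k : Int)) ↔ P[k] ∉ P.drop (k + 1) := by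
  have hmem : P[k] ∈ P := List.getElem_mem hk
  have hcont := (pmapOf_contains P P[k]).mpr hmem
  rw [PySem.Dict.contains_eq_isSome_get?] at hcont
  obtain ⟨w, hw⟩ := Option.isSome_iff_exists.mp hcont
  obtain ⟨k', hk', hPk', hlast'⟩ := (pmapOf_get?_iff P P[k] w).mp hw
  have hgd : (pmapOf P).getD P[k] 0 = w := by rw [PySem.Dict.getD_eq_get?_getD, hw]; rfl
  rw [hgd, hk']
  constructor
  · intro hkk hdrop
    obtain ⟨j, hj⟩ := List.mem_iff_getElem?.mp hdrop
    rw [List.getElem?_drop] at hj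
    have : (k : Int) = (k' : Int) := hkk.symm ▸ rfl
    have hke : k' = k := by omega
    exact hlast' (k + 1 + j) (by omega) (hke ▸ hj)
  · intro hdrop
    have hkk' : k ≤ k' := by
      by_contra h
      exact hlast' k (by omega) (by simp [List.getElem?_eq_getElem hk])
    have hk'k : k' ≤ k := by
      by_contra h
      apply hdrop
      rw [List.mem_iff_getElem?]
      obtain ⟨hl, he⟩ := List.getElem?_eq_some_iff.mp hPk'
      exact ⟨k' - (k + 1), by rw [List.getElem?_drop]; rw [show k + 1 + (k' - (k + 1)) = k' by omega]; exact hPk'⟩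
    have : k' = k := by omega
    rw [this]

theorem sorted_Lp_eq_Tlist (O P : List String) :
    PySem.List.sorted
      ((O.filter (fun s => (pmapOf P).contains s)).map (fun s => ((pmapOf P).getD s 0, s)))
      (fun x => x.1) false = Tlist O P := by
  apply eq_of_perm_of_pairwise_le_of_key_det (fun x => x.1)
  · exact (PySem.List.sorted_perm _ _ _).trans
      (List.perm_iff_count.mpr (fun a => by rw [count_Lp, count_Tlist]))
  · intro a ha b hb hab
    rw [PySem.List.mem_sorted] at ha hb
    obtain ⟨s, hs, rfl⟩ := List.mem_map.mp ha
    obtain ⟨t, ht, rfl⟩ := List.mem_map.mp hb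
    have hcs := (List.mem_filter.mp hs).2
    have hct := (List.mem_filter.mp ht).2
    rw [PySem.Dict.contains_eq_isSome_get?] at hcs hct
    obtain ⟨v, hv⟩ := Option.isSome_iff_exists.mp hcs
    obtain ⟨w, hw⟩ := Option.isSome_iff_exists.mp hct
    obtain ⟨k, hk, hPk, -⟩ := (pmapOf_get?_iff P s v).mp hv
    obtain ⟨k', hk', hPk', -⟩ := (pmapOf_get?_iff P t w).mp hw
    have hgs : (pmapOf P).getD s 0 = v := by rw [PySem.Dict.getD_eq_get?_getD, hv]; rfl
    have hgt : (pmapOf P).getD t 0 = w := by rw [PySem.Dict.getD_eq_get?_getD, hw]; rfl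
    simp only at hab
    rw [hgs, hgt] at hab
    have hkk : k = k' := by omega
    subst hkk
    rw [hPk] at hPk'
    injection hPk' with h
    simp [h]
  · exact PySem.List.sorted_pairwise _ _
  · exact pairwise_le_Tlist O P

-- ===== VERDICT (by name: the statement is the Claim_ definition above) =====
theorem prioritize_observations_spec : Claim_equal_prioritize_observations := by
  intro O P _
  unfold Spec_prioritize_observations prioritize_observations prioritize_observations_alt
  simp only []
  have hpm : (PySem.List.enumerate P).foldl (fun d p => d.insert p.2 p.1) PySem.Dict.empty = pmapOf P := rfl
  rw [hpm]
  -- split A's loop into its two accumulators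
  have hstep : (fun (acc : List (Int × String) × List String) (s : String) =>
      if (pmapOf P).contains s then (acc.1 ++ [((pmapOf P).getD s 0, s)], acc.2)
      else (acc.1, acc.2 ++ [s]))
      = fun acc s =>
        ((fun (l : List (Int × String)) (s : String) =>
            if (pmapOf P).contains s then l ++ [((pmapOf P).getD s 0, s)] else l) acc.1 s,
         (fun (l : List String) (s : String) =>
            if !(pmapOf P).contains s then l ++ [s] else l) acc.2 s) := by
    funext acc s
    by_cases h : (pmapOf P).contains s <;> simp [h]
  rw [hstep, PySem.List.foldl_prod_mk
    (f := fun (l : List (Int × String)) (s : String) =>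
      if (pmapOf P).contains s then l ++ [((pmapOf P).getD s 0, s)] else l)
    (g := fun (l : List String) (s : String) =>
      if !(pmapOf P).contains s then l ++ [s] else l)]
  simp only []
  rw [PySem.List.foldl_append_if ((pmapOf P).contains) (fun s => ((pmapOf P).getD s 0, s)) O [],
    PySem.List.foldl_append_if_eq_filter (fun s => !(pmapOf P).contains s) O [],
    List.nil_append, List.nil_append, sorted_Lp_eq_Tlist]
  -- B's block loop as a flatMap
  have hstepB : (fun (acc : List String) (p : Int × String) =>
      if ((pmapOf P).getD p.2 0 = p.1
            ∧ (O.foldl (fun d s => d.insert s (d.getD s 0 + 1)) (PySem.Dict.empty : PySem.Dict String Int)).contains p.2)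
      then acc ++ PySem.List.pyRepeat [p.2]
          ((O.foldl (fun d s => d.insert s (d.getD s 0 + 1)) (PySem.Dict.empty : PySem.Dict String Int)).getD p.2 0)
      else acc)
      = fun acc p => acc ++
        (if ((pmapOf P).getD p.2 0 = p.1
              ∧ (O.foldl (fun d s => d.insert s (d.getD s 0 + 1)) (PySem.Dict.empty : PySem.Dict String Int)).contains p.2)
         then PySem.List.pyRepeat [p.2]
            ((O.foldl (fun d s => d.insert s (d.getD s 0 + 1)) (PySem.Dict.empty : PySem.Dict String Int)).getD p.2 0)
         else []) := by
    funext acc p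
    by_cases h : ((pmapOf P).getD p.2 0 = p.1
        ∧ (O.foldl (fun d s => d.insert s (d.getD s 0 + 1)) (PySem.Dict.empty : PySem.Dict String Int)).contains p.2) <;> simp [h]
  rw [hstepB, PySem.List.foldl_append_eq_flatMap, List.nil_append]
  congr 1
  -- (1) the priority block
  · unfold Tlist
    rw [List.map_flatMap]
    apply List.flatMap_congr
    intro p hp
    obtain ⟨k, hklt, rfl⟩ := (PySem.List.mem_enumerate_iff P 0 p).mp hp
    have hcontB : ∀ x : String,
        ((O.foldl (fun d s => d.insert s (d.getD s 0 + 1)) (PySem.Dict.empty : PySem.Dict String Int)).contains x = true) ↔ x ∈ O := by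
      intro x
      rw [PySem.Dict.contains_iff_mem_keys, PySem.Dict.keys_foldl_insert]
      simp [PySem.Dict.keys_empty, PySem.Set.mem_update]
    have hgetB : (O.foldl (fun d s => d.insert s (d.getD s 0 + 1)) (PySem.Dict.empty : PySem.Dict String Int)).getD P[k] 0
        = (O.count P[k] : Int) := by
      rw [PySem.Dict.getD_foldl_insert_add_one, PySem.Dict.getD_empty]
      simp
    have hcond : ((pmapOf P).getD ((((0:Int) + k, P[k])).2) 0 = (((0:Int) + k, P[k])).1)
        ↔ P[k] ∉ P.drop (k + 1) := by
      simpa using pmapOf_getD_self P k hklt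
    have htn : ((((0:Int) + k, P[k]).1).toNat + 1) = k + 1 := by simp
    by_cases hm : P[k] ∈ P.drop (k + 1)
    · rw [htn, if_pos hm]
      rw [if_neg (by intro hc; exact (hcond.mp hc.1) hm)]
      simp
    · rw [htn, if_neg hm]
      by_cases ho : P[k] ∈ O
      · rw [if_pos ⟨hcond.mpr hm, (hcontB _).mpr ho⟩]
        rw [hgetB, PySem.List.pyRepeat_singleton]
        simp [List.map_replicate]
      · have hc0 : O.count P[k] = 0 := List.count_eq_zero_of_not_mem ho
        rw [if_neg (by intro hc; exact ho ((hcontB _).mp hc.2))]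
        simp [hc0]
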